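-- pv_equiv track=rewrite | github.com/jaewon-jun9/rpa | myexcel.py | excelNum
-- ===== SOURCE A (Python) =====
-- def excelNum(string):
--     num=0
--     for i,j in enumerate(string):
--         if ord(j)>57:
--             num=num+(ord(j.upper())-64)*(26**(len(string)-i-1))
--         else:
--             num=num+int(j)*10**(len(string)-i-1)
--     return num
-- ===== SOURCE B (Python) =====
-- def excelNum(string):
--     # Horner's method: two forward accumulators, no exponentiation anywhere.
--     a26 = 0
--     a10 = 0
--     for ch in string:
--         a26 *= 26
--         a10 *= 10
--         if ord(ch) > 57:
--             a26 += ord(ch.upper()) - 64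
--         else:
--             a10 += int(ch)
--     return a26 + a10
-- ===== Notes on version B (the rewrite author's own statement) =====
-- stated objective: faster
-- what changed: B uses Horner's method: a single forward pass threading two multiplicative accumulators (a26 = a26*26 + letter value, a10 = a10*10 + digit value) and returns their sum, computing no powers at all, where A recomputes 26**(len-i-1)/10**(len-i-1) at every position.
import Mathlib
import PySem

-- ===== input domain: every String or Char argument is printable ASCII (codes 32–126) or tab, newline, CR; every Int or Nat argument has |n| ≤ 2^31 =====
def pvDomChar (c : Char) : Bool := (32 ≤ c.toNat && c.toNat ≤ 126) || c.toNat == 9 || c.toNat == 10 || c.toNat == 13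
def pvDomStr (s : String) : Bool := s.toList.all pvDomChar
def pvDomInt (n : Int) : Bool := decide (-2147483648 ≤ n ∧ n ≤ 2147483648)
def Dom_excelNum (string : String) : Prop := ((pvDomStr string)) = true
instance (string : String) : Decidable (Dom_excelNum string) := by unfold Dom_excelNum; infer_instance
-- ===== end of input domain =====

-- B re-implements A by Horner's method: one forward pass with two multiplicative
-- accumulators (base 26 for letters, base 10 for digits), computing no powers.

-- ===== PORT A =====
-- int(j) (a single char) is ported as PySem.Int.ofStr?; Pre_ excludes the inputs where it is none (ValueError).
-- j.upper() on one char is PySem.Chars.upperChar (exact on the ASCII domain).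
def excelNum (string : String) : Int :=
  (PySem.List.enumerate string.toList 0).foldl
    (fun num ij =>
      if (ij.2.toNat : Int) > 57 then
        num + (((PySem.Chars.upperChar ij.2).toNat : Int) - 64) * 26 ^ (string.toList.length - ij.1.toNat - 1)
      else
        num + ((PySem.Int.ofStr? (String.ofList [ij.2])).getD 0) * 10 ^ (string.toList.length - ij.1.toNat - 1))
    0

-- ===== PORT B =====
-- Horner loop of Source B: state (a26, a10), one step per character left to right
def excelHorner : List Char → Int → Int → Int
  | [], a26, a10 => a26 + a10
  | c :: rest, a26, a10 =>
      if (c.toNat : Int) > 57 then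
        excelHorner rest (a26 * 26 + (((PySem.Chars.upperChar c).toNat : Int) - 64)) (a10 * 10)
      else
        excelHorner rest (a26 * 26) (a10 * 10 + ((PySem.Int.ofStr? (String.ofList [c])).getD 0))

def excelNum_alt (string : String) : Int :=
  excelHorner string.toList 0 0

-- ===== PRECONDITION & SPEC =====
-- Pre_ excludes exactly the strings containing a character of code ≤ 57 that is not a
-- decimal digit (space, '+', '-', '.', …): there Python A raises ValueError from int(j).
def Pre_excelNum (string : String) : Prop :=
  string.toList.all (fun c => 57 < c.toNat || (48 ≤ c.toNat && c.toNat ≤ 57)) = true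
instance (string : String) : Decidable (Pre_excelNum string) := by unfold Pre_excelNum; infer_instance

def pvWitness_excelNum : String := "A1b2"

def Spec_excelNum (string : String) (out : Int) : Prop := out = excelNum_alt string
instance (string : String) (out : Int) : Decidable (Spec_excelNum string out) := by unfold Spec_excelNum; infer_instance

-- ===== CLAIM (what is proved, stated in full; the proofs are below) =====
def Claim_equal_excelNum : Prop := ∀ (string : String), Dom_excelNum string → Pre_excelNum string → Spec_excelNum string (excelNum string)

-- ===== LEMMAS AND PROOFS =====

-- per-character contribution with exponent k
def excelF (c : Char) (k : Nat) : Int :=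
  if (c.toNat : Int) > 57 then
    (((PySem.Chars.upperChar c).toNat : Int) - 64) * 26 ^ k
  else
    ((PySem.Int.ofStr? (String.ofList [c])).getD 0) * 10 ^ k

-- value of a list read left-to-right (exponent = #chars to the right)
def excelS : List Char → Int
  | [] => 0
  | c :: rest => excelF c rest.length + excelS rest

-- Horner invariant
theorem excelHorner_spec (l : List Char) : ∀ (a26 a10 : Int),
    excelHorner l a26 a10 = a26 * 26 ^ l.length + a10 * 10 ^ l.length + excelS l := by
  induction l with
  | nil => intro a26 a10; simp [excelHorner, excelS]
  | cons c rest ih =>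
    intro a26 a10
    simp only [excelHorner, excelS, excelF, List.length_cons, pow_succ]
    split_ifs <;> rw [ih] <;> ring

theorem excelNum_foldl (l : List Char) : ∀ (num : Int) (k n : Nat), k + l.length = n →
    (PySem.List.enumerate l (k : Int)).foldl
      (fun num ij =>
        if (ij.2.toNat : Int) > 57 then
          num + (((PySem.Chars.upperChar ij.2).toNat : Int) - 64) * 26 ^ (n - ij.1.toNat - 1)
        else
          num + ((PySem.Int.ofStr? (String.ofList [ij.2])).getD 0) * 10 ^ (n - ij.1.toNat - 1))
      num = num + excelS l := by
  induction l with
  | nil => intro num k n _; simp [PySem.List.enumerate_nil, excelS]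
  | cons c rest ih =>
    intro num k n hk
    have hcast : (k : Int) + 1 = ((k + 1 : Nat) : Int) := by push_cast; ring
    have hkn : ((k : Int)).toNat = k := Int.toNat_natCast k
    have hexp : n - k - 1 = rest.length := by simp [List.length_cons] at hk; omega
    rw [PySem.List.enumerate_cons, List.foldl_cons, hcast,
        ih _ (k + 1) n (by simp [List.length_cons] at hk ⊢; omega)]
    simp only [hkn, hexp, excelS, excelF]
    split_ifs <;> ring

theorem excelNum_eq_S (s : String) : excelNum s = excelS s.toList := by
  have := excelNum_foldl s.toList 0 0 s.toList.length (by omega)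
  simpa [excelNum] using this

theorem excelNum_alt_eq_S (s : String) : excelNum_alt s = excelS s.toList := by
  simp [excelNum_alt, excelHorner_spec]

-- ===== VERDICT (by name: the statement is the Claim_ definition above) =====
theorem excelNum_spec : Claim_equal_excelNum := by
  intro s _ _
  unfold Spec_excelNum
  rw [excelNum_eq_S, excelNum_alt_eq_S]
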